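-- pv_equiv track=rewrite | github.com/thanhbn/qdrant-loader | packages/qdrant-loader/src/qdrant_loader/core/chunking/strategy/json/json_document_parser.py | _analyze_key_patterns
-- ===== SOURCE A (Python) =====
-- from typing import Any
--
-- def _analyze_key_patterns(data: Any) -> list[str]:
--     """Analyze patterns in JSON keys."""
--     if not isinstance(data, dict):
--         return []
--
--     keys = list(data.keys())
--     patterns = []
--
--     # Check for common patterns
--     if any(key.startswith("_") for key in keys):
--         patterns.append("private_keys")
--     if any(key.isupper() for key in keys):
--         patterns.append("uppercase_keys")
--     if any("_" in key for key in keys):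
--         patterns.append("snake_case")
--     if any(key[0].isupper() for key in keys if key):
--         patterns.append("camel_case")
--
--     return patterns
-- ===== SOURCE B (Python) =====
-- _ORDER = ("private_keys", "uppercase_keys", "snake_case", "camel_case")
--
--
-- def _key_labels(key):
--     """Classify a single key: the set of pattern labels this key exhibits."""
--     labels = set()
--     if key.startswith("_"):
--         labels.add("private_keys")
--     if key.isupper():
--         labels.add("uppercase_keys")
--     if "_" in key:
--         labels.add("snake_case")
--     if key and key[0].isupper():
--         labels.add("camel_case")
--     return labels
--
--
-- def _analyze_key_patterns(data):
--     """Analyze patterns in JSON keys.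
--
--     Inverts A's traversal: instead of one scan over the keys per pattern,
--     classify each key once into the set of labels it exhibits, union those
--     sets (stopping early once every label has been seen), and emit the
--     labels found in canonical order.
--     """
--     if not isinstance(data, dict):
--         return []
--
--     found = set()
--     for key in data:
--         found |= _key_labels(key)
--         if len(found) == len(_ORDER):
--             break
--     return [name for name in _ORDER if name in found]
-- ===== Notes on version B (the rewrite author's own statement) =====
-- stated objective: alternative
-- what changed: Inverts the loop nesting: instead of A's four pattern-wise any()-scans over the key list, B classifies each key once into the set of labels it exhibits, unions these sets with an early exit once all four labels are seen, and finally emits the labels in canonical order by filtering the label table against the accumulated set.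
import Mathlib
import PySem

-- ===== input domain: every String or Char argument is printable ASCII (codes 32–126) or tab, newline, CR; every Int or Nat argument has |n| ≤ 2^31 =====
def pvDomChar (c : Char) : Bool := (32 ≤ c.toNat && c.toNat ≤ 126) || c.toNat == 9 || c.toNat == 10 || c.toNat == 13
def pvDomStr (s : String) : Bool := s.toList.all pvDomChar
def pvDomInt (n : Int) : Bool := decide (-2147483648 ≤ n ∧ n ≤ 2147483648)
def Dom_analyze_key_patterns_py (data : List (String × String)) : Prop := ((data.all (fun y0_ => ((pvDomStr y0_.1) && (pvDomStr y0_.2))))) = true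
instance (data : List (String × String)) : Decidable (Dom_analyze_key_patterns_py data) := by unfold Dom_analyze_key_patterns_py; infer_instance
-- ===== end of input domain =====

-- B inverts A's traversal: instead of four pattern-wise any()-scans, it classifies each key
-- once into its set of labels, unions them (early exit when all four are seen), and filters
-- the canonical label table by membership (alternative decomposition, same cost).


-- str.isupper(), hand-ported (no PySem primitive): on the ASCII domain it is
-- "no lowercase character and at least one uppercase character" — exact there.
def pvStrIsupper (s : String) : Bool :=
  s.toList.all (fun c => !PySem.Chars.islower c) && s.toList.any PySem.Chars.isupper

-- key[0].isupper() guarded by 'if key' (key truthy, i.e. nonempty)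
def pvHeadIsupper (s : String) : Bool :=
  match s.toList with
  | [] => false
  | c :: _ => PySem.Chars.isupper c

-- ===== PORT A =====
def analyze_key_patterns_py (data : List (String × String)) : List String :=
  let keys := data.map (·.1)
  let patterns : List String := []
  let patterns := if keys.any (fun key => PySem.Str.startswith key "_") then patterns ++ ["private_keys"] else patterns
  let patterns := if keys.any (fun key => pvStrIsupper key) then patterns ++ ["uppercase_keys"] else patterns
  let patterns := if keys.any (fun key => PySem.Str.isIn "_" key) then patterns ++ ["snake_case"] else patterns
  let patterns := if keys.any (fun key => pvHeadIsupper key) then patterns ++ ["camel_case"] else patterns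
  patterns

-- ===== PORT B =====
-- the canonical label table _ORDER
def pvOrder : List String := ["private_keys", "uppercase_keys", "snake_case", "camel_case"]

-- _key_labels(key): the set of labels this single key exhibits
def pvKeyLabels (key : String) : PySem.Set String :=
  let labels : PySem.Set String := PySem.Set.empty
  let labels := if PySem.Str.startswith key "_" then PySem.Set.add labels "private_keys" else labels
  let labels := if pvStrIsupper key then PySem.Set.add labels "uppercase_keys" else labels
  let labels := if PySem.Str.isIn "_" key then PySem.Set.add labels "snake_case" else labels
  let labels := if pvHeadIsupper key then PySem.Set.add labels "camel_case" else labels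
  labels

-- B's loop: union the per-key label sets, break once all labels are present
def pvLoop (found : PySem.Set String) : List (String × String) → PySem.Set String
  | [] => found
  | p :: rest =>
    let f := PySem.Set.union found (pvKeyLabels p.1)
    if PySem.Set.len f == pvOrder.length then f else pvLoop f rest

def analyze_key_patterns_py_alt (data : List (String × String)) : List String :=
  let found := pvLoop PySem.Set.empty data
  pvOrder.filter (fun name => PySem.Set.contains found name)

-- ===== PRECONDITION & SPEC =====
def Spec_analyze_key_patterns_py (data : List (String × String)) (out : List String) : Prop := out = analyze_key_patterns_py_alt data
instance (data : List (String × String)) (out : List String) : Decidable (Spec_analyze_key_patterns_py data out) := by unfold Spec_analyze_key_patterns_py; infer_instance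

-- ===== CLAIM (what is proved, stated in full; the proofs are below) =====
def Claim_equal_analyze_key_patterns_py : Prop := ∀ (data : List (String × String)), Dom_analyze_key_patterns_py data → Spec_analyze_key_patterns_py data (analyze_key_patterns_py data)

-- ===== LEMMAS AND PROOFS =====

-- membership in a single key's label set, per label
theorem mem_pvKeyLabels (L key : String) :
    L ∈ pvKeyLabels key ↔
      (L = "private_keys" ∧ PySem.Str.startswith key "_" = true) ∨
      (L = "uppercase_keys" ∧ pvStrIsupper key = true) ∨
      (L = "snake_case" ∧ PySem.Str.isIn "_" key = true) ∨
      (L = "camel_case" ∧ pvHeadIsupper key = true) := by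
  simp only [pvKeyLabels]
  split_ifs <;> simp_all [PySem.Set.empty]

theorem pvKeyLabels_subset (key : String) : ∀ L ∈ pvKeyLabels key, L ∈ pvOrder := by
  intro L hL
  rcases (mem_pvKeyLabels L key).1 hL with ⟨h, _⟩ | ⟨h, _⟩ | ⟨h, _⟩ | ⟨h, _⟩ <;>
    simp [pvOrder, h]

-- a Nodup subset of the four labels with four elements contains every label
theorem pvFull (found : List String) (hn : found.Nodup)
    (hsub : ∀ x ∈ found, x ∈ pvOrder) (hlen : found.length = 4) :
    ∀ L ∈ pvOrder, L ∈ found := by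
  intro L hL
  have hsubF : found.toFinset ⊆ pvOrder.toFinset := by
    intro x hx
    exact List.mem_toFinset.2 (hsub x (List.mem_toFinset.1 hx))
  have hcard : pvOrder.toFinset.card ≤ found.toFinset.card := by
    rw [List.toFinset_card_of_nodup hn, hlen]
    decide
  have heq := Finset.eq_of_subset_of_card_le hsubF hcard
  have : L ∈ found.toFinset := by rw [heq]; exact List.mem_toFinset.2 hL
  exact List.mem_toFinset.1 this

-- the loop's membership equals "some key fires the label's test" (break included)
theorem pvLoop_mem (L : String) (hL : L ∈ pvOrder) :
    ∀ (data : List (String × String)) (found : PySem.Set String),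
      found.Nodup → (∀ x ∈ found, x ∈ pvOrder) →
      (L ∈ pvLoop found data ↔
        L ∈ found ∨ data.any (fun p => decide (L ∈ pvKeyLabels p.1)) = true) := by
  intro data
  induction data with
  | nil => intro found _ _; simp [pvLoop]
  | cons p rest ih =>
    intro found hn hsub
    have hfn : (PySem.Set.union found (pvKeyLabels p.1)).Nodup := PySem.Set.nodup_union found (pvKeyLabels p.1) hn
    have hfs : ∀ x ∈ PySem.Set.union found (pvKeyLabels p.1), x ∈ pvOrder := by
      intro x hx
      rcases (PySem.Set.mem_union found (pvKeyLabels p.1) x).1 hx with h | h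
      · exact hsub x h
      · exact pvKeyLabels_subset p.1 x h
    simp only [pvLoop]
    split_ifs with hbreak
    · have hlen4 : (PySem.Set.union found (pvKeyLabels p.1)).length = 4 := by
        have h := beq_iff_eq.1 hbreak
        simp only [PySem.Set.len, pvOrder, List.length_cons, List.length_nil] at h
        exact_mod_cast h
      have hLin : L ∈ PySem.Set.union found (pvKeyLabels p.1) :=
        pvFull _ hfn hfs hlen4 L hL
      have hrhs : L ∈ found ∨ L ∈ pvKeyLabels p.1 := (PySem.Set.mem_union found (pvKeyLabels p.1) L).1 hLin
      simp only [List.any_cons, Bool.or_eq_true, decide_eq_true_eq]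
      tauto
    · rw [ih _ hfn hfs]
      have := PySem.Set.mem_union found (pvKeyLabels p.1) L
      simp only [List.any_cons, Bool.or_eq_true, decide_eq_true_eq]
      tauto

-- ===== VERDICT (by name: the statement is the Claim_ definition above) =====
theorem pvLoop_empty_mem (data : List (String × String)) (L : String) (hL : L ∈ pvOrder) :
    L ∈ pvLoop PySem.Set.empty data ↔
      data.any (fun p => decide (L ∈ pvKeyLabels p.1)) = true := by
  have := pvLoop_mem L hL data PySem.Set.empty (by simp [PySem.Set.empty]) (by simp [PySem.Set.empty])
  simpa [PySem.Set.empty] using this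

theorem analyze_key_patterns_py_spec : Claim_equal_analyze_key_patterns_py := by
  intro data _
  unfold Spec_analyze_key_patterns_py
  simp only [analyze_key_patterns_py, analyze_key_patterns_py_alt]
  have h1 : PySem.Set.contains (pvLoop PySem.Set.empty data) "private_keys"
      = (data.map (·.1)).any (fun key => PySem.Str.startswith key "_") := by
    apply Bool.eq_iff_iff.2
    rw [PySem.Set.contains_iff, pvLoop_empty_mem data _ (by decide)]
    simp [List.any_map, List.any_eq_true, mem_pvKeyLabels, Function.comp]
  have h2 : PySem.Set.contains (pvLoop PySem.Set.empty data) "uppercase_keys"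
      = (data.map (·.1)).any (fun key => pvStrIsupper key) := by
    apply Bool.eq_iff_iff.2
    rw [PySem.Set.contains_iff, pvLoop_empty_mem data _ (by decide)]
    simp [List.any_map, List.any_eq_true, mem_pvKeyLabels, Function.comp]
  have h3 : PySem.Set.contains (pvLoop PySem.Set.empty data) "snake_case"
      = (data.map (·.1)).any (fun key => PySem.Str.isIn "_" key) := by
    apply Bool.eq_iff_iff.2
    rw [PySem.Set.contains_iff, pvLoop_empty_mem data _ (by decide)]
    simp [List.any_map, List.any_eq_true, mem_pvKeyLabels, Function.comp]
  have h4 : PySem.Set.contains (pvLoop PySem.Set.empty data) "camel_case"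
      = (data.map (·.1)).any (fun key => pvHeadIsupper key) := by
    apply Bool.eq_iff_iff.2
    rw [PySem.Set.contains_iff, pvLoop_empty_mem data _ (by decide)]
    simp [List.any_map, List.any_eq_true, mem_pvKeyLabels, Function.comp]
  simp only [pvOrder, List.filter_cons, List.filter_nil, h1, h2, h3, h4]
  clear h1 h2 h3 h4
  split_ifs <;> rfl
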